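-- pv_equiv track=rewrite | github.com/musclefrog/Programmers_Algorithm | 프로그래머스/2/42626. 더 맵게/더 맵게.py | solution
-- ===== SOURCE A (Python) =====
-- import heapq
--
-- def solution(scoville, K):
--     cnt = 0
--     heapq.heapify(scoville) # scoville list -> heap 구조로
--
--     while len(scoville) >= 2: # heappop() 했을 때 IndexError 방지
--         min1 = heapq.heappop(scoville)
--         if min1 >= K:
--             return cnt
--         else:
--             min2 = heapq.heappop(scoville)
--             heapq.heappush(scoville, min1 + min2*2)
--             cnt += 1
--
--     if scoville[0] >= K:
--         return cnt
--     else: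
--         return -1
-- ===== SOURCE B (Python) =====
-- def solution(scoville, K):
--     # No priority queue at all: each round one left-to-right selection scan
--     # finds the two smallest values while spilling everything else into the
--     # rebuilt pool, then the mix is appended to it.
--     pool = list(scoville)
--     cnt = 0
--     while len(pool) >= 2:
--         a, b = pool[0], pool[1]
--         if b < a:
--             a, b = b, a
--         rest = []
--         for x in pool[2:]:
--             if x < a:
--                 rest.append(b)
--                 a, b = x, a
--             elif x < b:
--                 rest.append(b)
--                 b = x
--             else:
--                 rest.append(x)
--         if a >= K:
--             return cnt
--         pool = rest + [a + 2 * b]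
--         cnt += 1
--     if pool[0] >= K:
--         return cnt
--     return -1
-- ===== Notes on version B (the rewrite author's own statement) =====
-- stated objective: alternative
-- what changed: Removes the priority queue entirely: each round a single left-to-right selection scan finds the two smallest values while simultaneously rebuilding the remaining pool as a plain list, and the mix is appended; no heap, sort or binary insertion is ever maintained.
import Mathlib
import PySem

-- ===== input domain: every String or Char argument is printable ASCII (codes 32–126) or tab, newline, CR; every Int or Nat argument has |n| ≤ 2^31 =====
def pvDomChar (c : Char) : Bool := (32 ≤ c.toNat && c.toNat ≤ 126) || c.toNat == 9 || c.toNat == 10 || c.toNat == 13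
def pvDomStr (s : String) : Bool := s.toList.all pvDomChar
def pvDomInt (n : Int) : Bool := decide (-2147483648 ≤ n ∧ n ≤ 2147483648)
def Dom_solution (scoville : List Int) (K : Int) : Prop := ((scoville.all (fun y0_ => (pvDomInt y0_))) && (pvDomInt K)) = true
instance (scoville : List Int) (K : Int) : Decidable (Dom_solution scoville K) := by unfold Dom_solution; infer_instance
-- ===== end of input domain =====

-- B replaces A's heap with a per-round selection scan over a plain list (objective: alternative,
-- same return value); A mutates its scoville argument in place (heapify/pops), B does not — the
-- equivalence proved here is about the RETURN value only.

-- ===== PORT A =====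
-- heapq is ported by its multiset contract (exact for the observable behaviour of A, which only
-- ever consumes the heap through heappop): the heap list is the multiset it represents;
-- heappop returns the minimum and removes one occurrence of it, heappush adds its element.
def pyHeappop (h : List Int) : Option (Int × List Int) :=
  match PySem.List.min? h (fun x => x) with
  | none => none
  | some m => some (m, h.erase m)

-- the while-loop of A; terminates because each iteration shrinks the heap by one element
def solutionLoop (K : Int) (h : List Int) (cnt : Int) : Int :=
  if hl : h.length ≥ 2 then
    match hm1 : pyHeappop h with
    | none => 0  -- unreachable: h has ≥ 2 elements
    | some (min1, h1) =>
      if min1 ≥ K then cnt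
      else
        match hm2 : pyHeappop h1 with
        | none => 0  -- unreachable: h1 has ≥ 1 element
        | some (min2, h2) =>
          solutionLoop K ((min1 + min2 * 2) :: h2) (cnt + 1)
  else
    match h with
    | [] => 0  -- unreachable under Pre_solution: Python raises IndexError at scoville[0]
    | x :: _ => if x ≥ K then cnt else -1
termination_by h.length
decreasing_by
  simp only [pyHeappop] at hm1 hm2
  split at hm1
  case _ => simp at hm1
  case _ m hmin1 =>
    simp only [Option.some.injEq, Prod.mk.injEq] at hm1
    obtain ⟨e1, e2⟩ := hm1
    split at hm2
    case _ => simp at hm2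
    case _ m2' hmin2 =>
      simp only [Option.some.injEq, Prod.mk.injEq] at hm2
      obtain ⟨f1, f2⟩ := hm2
      have m1mem := PySem.List.min?_mem hmin1
      have m2mem := PySem.List.min?_mem hmin2
      have l1 : h1.length = h.length - 1 := by
        rw [← e2]; exact List.length_erase_of_mem m1mem
      have l2 : h2.length = h1.length - 1 := by
        rw [← f2]; exact List.length_erase_of_mem m2mem
      simp only [List.length_cons, l2, l1]
      omega

def solution (scoville : List Int) (K : Int) : Int :=
  -- cnt = 0; heapify (multiset view: the list itself); then the while-loop
  solutionLoop K scoville 0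

-- ===== PORT B =====
-- one step of B's selection scan: state (a, b, rest) = two smallest seen so far (a ≤ b) and
-- the spilled remainder, exactly the body of Source B's for-loop
def scanStep (s : Int × Int × List Int) (x : Int) : Int × Int × List Int :=
  match s with
  | (a, b, rest) =>
    if x < a then (x, a, rest ++ [b])
    else if x < b then (a, x, rest ++ [b])
    else (a, b, rest ++ [x])

theorem scanStep_len : ∀ (tail : List Int) (a b : Int) (r : List Int),
    (tail.foldl scanStep (a, b, r)).2.2.length = r.length + tail.length := by
  intro tail
  induction tail with
  | nil => intro a b r; simp
  | cons x xs ih =>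
    intro a b r
    simp only [List.foldl_cons, scanStep]
    split
    · rw [ih]; simp; omega
    · split
      · rw [ih]; simp; omega
      · rw [ih]; simp; omega

-- the whole selection pass of one round: a, b = pool[0], pool[1] (swapped if needed),
-- then the for-loop over pool[2:]
def scanPair (p0 p1 : Int) (tail : List Int) : Int × Int × List Int :=
  tail.foldl scanStep ((if p1 < p0 then p1 else p0), (if p1 < p0 then p0 else p1), [])

theorem scanPair_len (p0 p1 : Int) (tail : List Int) :
    (scanPair p0 p1 tail).2.2.length = tail.length := by
  simp [scanPair, scanStep_len]

-- the while-loop of B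
def solutionAltLoop (K : Int) (pool : List Int) (cnt : Int) : Int :=
  if hl : pool.length ≥ 2 then
    match pool with
    | p0 :: p1 :: tail =>
      let st := scanPair p0 p1 tail
      if st.1 ≥ K then cnt
      else solutionAltLoop K (st.2.2 ++ [st.1 + 2 * st.2.1]) (cnt + 1)
    | _ => 0  -- unreachable: pool has ≥ 2 elements
  else
    match pool with
    | [] => 0  -- unreachable under Pre_solution: Python raises IndexError at pool[0]
    | x :: _ => if x ≥ K then cnt else -1
termination_by pool.length
decreasing_by
  simp only [List.length_append, List.length_cons, List.length_nil, scanPair_len]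
  omega

def solution_alt (scoville : List Int) (K : Int) : Int :=
  solutionAltLoop K scoville 0

-- ===== PRECONDITION & SPEC =====
-- Pre_ excludes only the empty list, on which both Pythons raise IndexError at the final [0] access.
def Pre_solution (scoville : List Int) (K : Int) : Prop := scoville ≠ []
instance (scoville : List Int) (K : Int) : Decidable (Pre_solution scoville K) := by unfold Pre_solution; infer_instance
def pvWitness_solution : List Int × Int := ([1, 2, 3, 9, 10, 12], 7)

def Spec_solution (scoville : List Int) (K : Int) (out : Int) : Prop := out = solution_alt scoville K
instance (scoville : List Int) (K : Int) (out : Int) : Decidable (Spec_solution scoville K out) := by unfold Spec_solution; infer_instance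

-- ===== CLAIM (what is proved, stated in full; the proofs are below) =====
def Claim_equal_solution : Prop := ∀ (scoville : List Int) (K : Int), Dom_solution scoville K → Pre_solution scoville K → Spec_solution scoville K (solution scoville K)

-- ===== LEMMAS AND PROOFS =====

-- invariant of B's selection scan: a ≤ b, b is below every spilled element, and the state
-- is a permutation of what has been consumed
theorem scan_inv : ∀ (tail : List Int) (a b : Int) (r : List Int),
    a ≤ b → (∀ x ∈ r, b ≤ x) →
    (tail.foldl scanStep (a, b, r)).1 ≤ (tail.foldl scanStep (a, b, r)).2.1 ∧
    (∀ x ∈ (tail.foldl scanStep (a, b, r)).2.2, (tail.foldl scanStep (a, b, r)).2.1 ≤ x) ∧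
    ((tail.foldl scanStep (a, b, r)).1 :: (tail.foldl scanStep (a, b, r)).2.1 ::
      (tail.foldl scanStep (a, b, r)).2.2).Perm (a :: b :: r ++ tail) := by
  intro tail
  induction tail with
  | nil =>
    intro a b r hab hr
    refine ⟨hab, hr, by simp⟩
  | cons x xs ih =>
    intro a b r hab hr
    simp only [List.foldl_cons, scanStep]
    split
    · rename_i hxa
      have h1 : x ≤ a := le_of_lt hxa
      have h2 : ∀ y ∈ r ++ [b], a ≤ y := by
        intro y hy
        rcases List.mem_append.mp hy with hy | hy
        · exact le_trans hab (hr y hy)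
        · simp at hy; omega
      obtain ⟨i1, i2, i3⟩ := ih x a (r ++ [b]) h1 h2
      refine ⟨i1, i2, i3.trans ?_⟩
      simp only [List.cons_append]
      simp [List.perm_iff_count, List.count_append, List.count_cons]
      intro c; omega
    · split
      · rename_i hxa hxb
        have h1 : a ≤ x := by omega
        have h2 : ∀ y ∈ r ++ [b], x ≤ y := by
          intro y hy
          rcases List.mem_append.mp hy with hy | hy
          · exact le_trans (le_of_lt hxb) (hr y hy)
          · simp at hy; omega
        obtain ⟨i1, i2, i3⟩ := ih a x (r ++ [b]) h1 h2
        refine ⟨i1, i2, i3.trans ?_⟩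
        simp only [List.cons_append]
        simp [List.perm_iff_count, List.count_append, List.count_cons]
        intro c; omega
      · rename_i hxa hxb
        have h2 : ∀ y ∈ r ++ [x], b ≤ y := by
          intro y hy
          rcases List.mem_append.mp hy with hy | hy
          · exact hr y hy
          · simp at hy; omega
        obtain ⟨i1, i2, i3⟩ := ih a b (r ++ [x]) hab h2
        refine ⟨i1, i2, i3.trans ?_⟩
        simp only [List.cons_append]
        simp [List.perm_iff_count, List.count_append, List.count_cons]

-- the scan of one round: its first two outputs are the two minima of the pool, in order,
-- and all of the pool survives as a permutation
theorem scanPair_inv (p0 p1 : Int) (tail : List Int) :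
    (scanPair p0 p1 tail).1 ≤ (scanPair p0 p1 tail).2.1 ∧
    (∀ x ∈ (scanPair p0 p1 tail).2.2, (scanPair p0 p1 tail).2.1 ≤ x) ∧
    ((scanPair p0 p1 tail).1 :: (scanPair p0 p1 tail).2.1 ::
      (scanPair p0 p1 tail).2.2).Perm (p0 :: p1 :: tail) := by
  unfold scanPair
  obtain ⟨i1, i2, i3⟩ := scan_inv tail (if p1 < p0 then p1 else p0)
    (if p1 < p0 then p0 else p1) [] (by split <;> omega) (by simp)
  refine ⟨i1, i2, i3.trans ?_⟩
  by_cases hp : p1 < p0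
  · simp only [if_pos hp, List.nil_append]
    exact List.Perm.swap p0 p1 tail
  · simp only [if_neg hp, List.nil_append]
    exact List.Perm.refl _

-- the minimum of any permutation of a :: t with a minimal is a
theorem min?_of_perm_min {h : List Int} {a : Int} {t : List Int}
    (hp : h.Perm (a :: t)) (hmin : ∀ x ∈ t, a ≤ x) :
    PySem.List.min? h (fun x => x) = some a := by
  cases hm : PySem.List.min? h (fun x => x) with
  | none =>
      rw [PySem.List.min?_eq_none_iff] at hm
      subst hm; exact absurd hp.symm (by simp)
  | some m =>
      have hmemh : m ∈ h := PySem.List.min?_mem hm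
      have hma : m ≤ a := PySem.List.min?_isMin hm a (hp.mem_iff.mpr (by simp))
      have ham : a ≤ m := by
        have : m ∈ a :: t := hp.mem_iff.mp hmemh
        rcases List.mem_cons.mp this with rfl | hmt
        · exact le_refl _
        · exact hmin m hmt
      exact congrArg some (le_antisymm hma ham)

-- core: A's heap loop and B's scan loop agree whenever the heap is a permutation of B's pool
theorem loop_eq (K : Int) : ∀ n (h pool : List Int) (cnt : Int), h.Perm pool →
    pool ≠ [] → pool.length = n → solutionLoop K h cnt = solutionAltLoop K pool cnt := by
  intro n
  induction n using Nat.strong_induction_on with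
  | _ n ih =>
    intro h pool cnt hp hne hlen
    match pool with
    | [] => exact absurd rfl hne
    | [x] =>
        have hx : h = [x] := List.perm_singleton.mp hp
        have hlen1 : ¬ ([x] : List Int).length ≥ 2 := by simp
        rw [solutionLoop.eq_def, solutionAltLoop.eq_def, hx, dif_neg hlen1, dif_neg hlen1]
    | p0 :: p1 :: tail =>
        have hlen2 : (p0 :: p1 :: tail).length ≥ 2 := by simp
        have hhlen2 : h.length ≥ 2 := by rw [hp.length_eq]; simp
        set st := scanPair p0 p1 tail with hst
        obtain ⟨i1, i2, hpool⟩ := scanPair_inv p0 p1 tail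
        have hpa : h.Perm (st.1 :: st.2.1 :: st.2.2) := hp.trans hpool.symm
        have hamin : ∀ x ∈ st.2.1 :: st.2.2, st.1 ≤ x := by
          intro x hx
          rcases List.mem_cons.mp hx with rfl | hx
          · exact i1
          · exact le_trans i1 (i2 x hx)
        have hmin1 : PySem.List.min? h (fun x => x) = some st.1 := min?_of_perm_min hpa hamin
        have hp1 : (h.erase st.1).Perm (st.2.1 :: st.2.2) := by
          have := hpa.erase st.1; simpa using this
        have hmin2 : PySem.List.min? (h.erase st.1) (fun x => x) = some st.2.1 :=
          min?_of_perm_min hp1 i2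
        have hpop1 : pyHeappop h = some (st.1, h.erase st.1) := by simp [pyHeappop, hmin1]
        have hpop2 : pyHeappop (h.erase st.1) =
            some (st.2.1, (h.erase st.1).erase st.2.1) := by
          simp [pyHeappop, hmin2]
        have hrhs : solutionAltLoop K (p0 :: p1 :: tail) cnt =
            if st.1 ≥ K then cnt
            else solutionAltLoop K (st.2.2 ++ [st.1 + 2 * st.2.1]) (cnt + 1) := by
          rw [solutionAltLoop.eq_def, dif_pos hlen2]
        rw [solutionLoop.eq_def, dif_pos hhlen2, hrhs]
        split
        · rename_i heq
          rw [hpop1] at heq; exact absurd heq (by simp)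
        · rename_i min1 h1 heq
          rw [hpop1] at heq
          simp only [Option.some.injEq, Prod.mk.injEq] at heq
          obtain ⟨rfl, rfl⟩ := heq
          by_cases hK : st.1 ≥ K
          · simp [hK]
          · rw [if_neg hK, if_neg hK]
            split
            · rename_i heq2
              rw [hpop2] at heq2; exact absurd heq2 (by simp)
            · rename_i min2 h2 heq2
              rw [hpop2] at heq2
              simp only [Option.some.injEq, Prod.mk.injEq] at heq2
              obtain ⟨rfl, rfl⟩ := heq2
              have hr : ((h.erase st.1).erase st.2.1).Perm st.2.2 := by
                have := hp1.erase st.2.1; simpa using this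
              have hperm2 : ((st.1 + st.2.1 * 2) :: (h.erase st.1).erase st.2.1).Perm
                  (st.2.2 ++ [st.1 + 2 * st.2.1]) := by
                have hv : st.1 + st.2.1 * 2 = st.1 + 2 * st.2.1 := by ring
                rw [hv]
                exact (List.Perm.cons _ hr).trans
                  (List.perm_append_singleton (st.1 + 2 * st.2.1) st.2.2).symm
              have hne2 : st.2.2 ++ [st.1 + 2 * st.2.1] ≠ [] := by simp
              have hlt : (st.2.2 ++ [st.1 + 2 * st.2.1]).length < n := by
                have hll : st.2.2.length = tail.length := by
                  rw [hst, scanPair_len]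
                simp only [List.length_append, List.length_cons, List.length_nil, hll]
                simp only [List.length_cons] at hlen
                omega
              exact ih _ hlt _ _ _ hperm2 hne2 rfl

-- ===== VERDICT (by name: the statement is the Claim_ definition above) =====
theorem solution_spec : Claim_equal_solution := by
  intro scoville K _hdom hpre
  unfold Spec_solution solution solution_alt
  exact loop_eq K _ scoville scoville 0 (List.Perm.refl _) hpre rfl
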